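-- pv_equiv track=rewrite | github.com/dolgodolah/TIL | algorithm/Programmers/카카오 코딩테스트/2021 카카오 블라인드 채용_신규 아이디 추천.py | solution
-- ===== SOURCE A (Python) =====
-- def solution(new_id):
--     answer = ''
--     #1단계 new_id의 모든 대문자를 대응되는 소문자로 치환합니다.
--     new_id=new_id.lower()
--
--     #2단계 new_id에서 알파벳 소문자, 숫자, 빼기(-), 밑줄(_), 마침표(.)를 제외한 모든 문자를 제거합니다.
--     temp=''
--     for i in new_id:
--         if i.isdecimal() or i.isalpha() or i=='-' or i=='_' or i=='.':
--             temp+=i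
--
--     #3단계 new_id에서 마침표(.)가 2번 이상 연속된 부분을 하나의 마침표(.)로 치환합니다.
--     temp=list(temp)
--     idx=0
--     while idx<len(temp):
--         if idx+1<len(temp) and temp[idx]=='.' and temp[idx+1]=='.':
--             temp.pop(idx)
--             continue
--         idx+=1
--
--     #4단계 new_id에서 마침표(.)가 처음이나 끝에 위치한다면 제거합니다.
--     if temp and temp[0]=='.':temp.pop(0)
--     if temp and temp[-1]=='.':temp.pop()
--
--     #5단계 new_id가 빈 문자열이라면, new_id에 "a"를 대입합니다.
--     if not temp:
--         temp.append('a')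
--
--     #6단계 new_id의 길이가 16자 이상이면, new_id의 첫 15개의 문자를 제외한 나머지 문자들을 모두 제거합니다.
--     if len(temp)>=16:
--         temp=temp[0:15]
--         if temp[-1]=='.':
--             temp.pop()
--
--     #7단계 new_id의 길이가 2자 이하라면, new_id의 마지막 문자를 new_id의 길이가 3이 될 때까지 반복해서 끝에 붙입니다.
--     if len(temp)<=2:
--         while len(temp)<3:
--             temp.append(temp[-1])
--
--     answer=''.join(temp)
--     return answer
-- ===== SOURCE B (Python) =====
-- def solution(new_id):
--     s = new_id.lower()
--     s = ''.join(c for c in s if c.isdecimal() or c.isalpha() or c in '-_.')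
--     # segment-based dot handling: collapses runs of dots and strips leading/trailing dots in one pass
--     s = '.'.join(p for p in s.split('.') if p)
--     if not s:
--         s = 'a'
--     if len(s) > 15:
--         s = s[:15]
--         if s.endswith('.'):
--             s = s[:-1]
--     if len(s) < 3:
--         s += s[-1] * (3 - len(s))
--     return s
-- ===== Notes on version B (the rewrite author's own statement) =====
-- stated objective: idiomatic
-- what changed: Steps 3-4 (collapse runs of dots, strip leading/trailing dots) are replaced by one segment pass that splits on the dot character, drops empty segments and rejoins, instead of A's index-walking pop loop; the character filter becomes a join-over-comprehension and step 7's while loop becomes a single replicate-append.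
import Mathlib
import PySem

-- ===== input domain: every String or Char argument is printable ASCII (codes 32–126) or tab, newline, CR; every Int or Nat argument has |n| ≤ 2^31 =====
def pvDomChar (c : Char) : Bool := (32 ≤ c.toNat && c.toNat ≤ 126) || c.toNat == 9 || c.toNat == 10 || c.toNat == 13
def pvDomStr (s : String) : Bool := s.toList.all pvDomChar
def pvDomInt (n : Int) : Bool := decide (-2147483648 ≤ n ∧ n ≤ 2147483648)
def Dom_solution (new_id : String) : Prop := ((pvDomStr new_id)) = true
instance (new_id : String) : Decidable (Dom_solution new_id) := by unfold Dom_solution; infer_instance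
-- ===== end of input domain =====

-- B replaces A's index-walking pop loop for the dot steps by split/filter/join done in one segment
-- pass (objective: idiomatic); return value only, no argument is mutated.

-- the step-2 character predicate, shared verbatim by both Pythons
-- (Python isdecimal = PySem isdigit on the ASCII domain)
def idChar (c : Char) : Bool :=
  PySem.Chars.isdigit c || PySem.Chars.isalpha c || c == '-' || c == '_' || c == '.'

-- ===== PORT A =====
-- A's step-3 while loop: state (temp, idx); pop at idx keeps idx, otherwise idx += 1
def solutionStep3 (temp : List Char) (idx : Nat) : List Char :=
  if idx < temp.length then
    if idx + 1 < temp.length ∧ temp[idx]! = '.' ∧ temp[idx + 1]! = '.' then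
      solutionStep3 (temp.eraseIdx idx) idx
    else
      solutionStep3 temp (idx + 1)
  else temp
termination_by temp.length - idx
decreasing_by
  · have : (temp.eraseIdx idx).length = temp.length - 1 := List.length_eraseIdx_of_lt (by omega)
    omega
  · omega

-- A's step-7 while loop (temp is nonempty whenever Python runs it, so temp[-1] = getLastD)
def solutionPad (temp : List Char) : List Char :=
  if temp.length < 3 then solutionPad (temp ++ [temp.getLastD ' ']) else temp
termination_by 3 - temp.length

def solution (new_id : String) : String :=
  let cs := PySem.Chars.lower new_id.toList
  let temp := cs.foldl (fun acc i => if idChar i then acc ++ [i] else acc) ([] : List Char)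
  let temp := solutionStep3 temp 0
  let temp := if temp ≠ [] ∧ temp.headD ' ' = '.' then temp.tail else temp
  let temp := if temp ≠ [] ∧ temp.getLastD ' ' = '.' then temp.dropLast else temp
  let temp := if temp = [] then ['a'] else temp
  let temp :=
    if 16 ≤ temp.length then
      let t := temp.take 15
      if t.getLastD ' ' = '.' then t.dropLast else t
    else temp
  let temp := if temp.length ≤ 2 then solutionPad temp else temp
  String.mk temp

-- ===== PORT B =====
def solution_alt (new_id : String) : String :=
  let s := PySem.Chars.lower new_id.toList
  let s := s.filter idChar
  -- '.'.join(p for p in s.split('.') if p); List.splitOn with a one-char separator is exactly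
  -- Python str.split, List.intercalate is exactly str.join
  let s := List.intercalate ['.'] ((s.splitOn '.').filter (· ≠ []))
  let s := if s = [] then ['a'] else s
  let s :=
    if 15 < s.length then
      let t := s.take 15
      if PySem.Chars.endswith t ['.'] then t.dropLast else t
    else s
  -- s is nonempty here, so Python's s[-1] = getLastD
  let s := if s.length < 3 then s ++ List.replicate (3 - s.length) (s.getLastD ' ') else s
  String.mk s

-- ===== PRECONDITION & SPEC =====
def Spec_solution (new_id : String) (out : String) : Prop := out = solution_alt new_id
instance (new_id : String) (out : String) : Decidable (Spec_solution new_id out) := by unfold Spec_solution; infer_instance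

-- ===== CLAIM (what is proved, stated in full; the proofs are below) =====
def Claim_equal_solution : Prop := ∀ (new_id : String), Dom_solution new_id → Spec_solution new_id (solution new_id)

-- ===== LEMMAS AND PROOFS =====

-- step 2: A's append-fold is a filter
theorem foldl_filter_id (cs : List Char) (acc : List Char) :
    cs.foldl (fun acc i => if idChar i then acc ++ [i] else acc) acc = acc ++ cs.filter idChar := by
  induction cs generalizing acc with
  | nil => simp
  | cons c r ih =>
    simp only [List.foldl_cons, List.filter_cons]
    by_cases h : idChar c <;> simp [h, ih]

-- collapse of runs of dots, the structural reading of A's step-3 loop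
def collapse : List Char → List Char
  | [] => []
  | c :: r => if c = '.' ∧ r.headD ' ' = '.' then collapse r else c :: collapse r

-- normD = the normalized string (dots collapsed, leading/trailing dots stripped);
-- normE = same but a single leading dot survives (used after a non-dot character)
mutual
def normD : List Char → List Char
  | [] => []
  | c :: r => if c = '.' then normD r else c :: normE r
def normE : List Char → List Char
  | [] => []
  | c :: r =>
    if c = '.' then (match normD r with | [] => [] | t => '.' :: t)
    else c :: normE r
end

theorem collapse_ne_nil (cs : List Char) (h : cs ≠ []) : collapse cs ≠ [] := by
  induction cs with
  | nil => simp at h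
  | cons c r ih =>
    simp only [collapse]
    split
    · rename_i hc
      have hr : r ≠ [] := by
        intro hn; subst hn; simp at hc
      exact ih hr
    · simp

theorem headD_collapse (c : Char) (r : List Char) (hc : c ≠ '.') :
    (collapse (c :: r)).headD ' ' = c := by
  simp [collapse, hc]

-- A's step-3 loop computes collapse
theorem step3_eq (temp : List Char) (idx : Nat) :
    solutionStep3 temp idx = temp.take idx ++ collapse (temp.drop idx) := by
  induction temp, idx using solutionStep3.induct with
  | case1 temp idx hlt hcond ih =>
    rw [solutionStep3, if_pos hlt, if_pos hcond, ih]
    obtain ⟨h1, h2, h3⟩ := hcond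
    have e1 : temp.eraseIdx idx = temp.take idx ++ temp.drop (idx + 1) :=
      List.eraseIdx_eq_take_drop_succ temp idx
    have hi : (temp.take idx).length = idx := List.length_take_of_le (by omega)
    have d0 : temp.drop idx = temp[idx]! :: temp.drop (idx + 1) := by
      rw [getElem!_pos temp idx hlt]
      exact List.drop_eq_getElem_cons hlt
    have d1 : temp.drop (idx + 1) = temp[idx + 1]! :: temp.drop (idx + 2) := by
      rw [getElem!_pos temp (idx + 1) h1]
      exact List.drop_eq_getElem_cons h1
    rw [e1, List.take_left' hi, List.drop_left' hi]
    congr 1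
    rw [d0, d1, h2, h3]
    conv_rhs => rw [collapse]
    rw [if_pos (by simp)]
  | case2 temp idx hlt hcond ih =>
    rw [solutionStep3, if_pos hlt, if_neg hcond, ih]
    have d0 : temp.drop idx = temp[idx] :: temp.drop (idx + 1) := List.drop_eq_getElem_cons hlt
    have tk : temp.take (idx + 1) = temp.take idx ++ [temp[idx]] := by
      rw [List.take_succ]
      simp [List.getElem?_eq_getElem hlt]
    have hcol : collapse (temp[idx] :: temp.drop (idx + 1)) = temp[idx] :: collapse (temp.drop (idx + 1)) := by
      rw [collapse, if_neg]
      intro ⟨ha, hb⟩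
      by_cases h1 : idx + 1 < temp.length
      · have d1 : temp.drop (idx + 1) = temp[idx + 1] :: temp.drop (idx + 2) := List.drop_eq_getElem_cons h1
        rw [d1, List.headD_cons] at hb
        exact hcond ⟨h1, by rw [getElem!_pos temp idx hlt]; exact ha,
          by rw [getElem!_pos temp (idx + 1) h1]; exact hb⟩
      · have : temp.drop (idx + 1) = [] := List.drop_eq_nil_of_le (by omega)
        rw [this] at hb
        exact absurd hb (by decide)
    rw [d0, hcol, tk, List.append_assoc, List.singleton_append]
  | case3 temp idx hlt =>
    rw [solutionStep3, if_neg hlt]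
    have h : temp.length ≤ idx := by omega
    rw [List.take_of_length_le h, List.drop_eq_nil_of_le h]
    simp [collapse]

-- the two strip steps of A's step 4, as written in the port
def stripL (t : List Char) : List Char := if t ≠ [] ∧ t.headD ' ' = '.' then t.tail else t
def stripT (t : List Char) : List Char := if t ≠ [] ∧ t.getLastD ' ' = '.' then t.dropLast else t

theorem stripT_cons (c : Char) (xs : List Char) (hxs : xs ≠ []) :
    stripT (c :: xs) = c :: stripT xs := by
  unfold stripT
  have hl : (c :: xs).getLastD ' ' = xs.getLastD ' ' := by
    cases xs with
    | nil => simp at hxs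
    | cons a b => simp [List.getLastD]
  have hd : (c :: xs).dropLast = c :: xs.dropLast := by
    cases xs with
    | nil => simp at hxs
    | cons a b => simp
  by_cases h : xs.getLastD ' ' = '.'
  · rw [if_pos ⟨by simp, by rw [hl]; exact h⟩, if_pos ⟨hxs, h⟩, hd]
  · rw [if_neg (by rintro ⟨-, hh⟩; rw [hl] at hh; exact h hh),
      if_neg (by rintro ⟨-, hh⟩; exact h hh)]

theorem stripT_collapse (cs : List Char) : stripT (collapse cs) = normE cs := by
  induction cs using collapse.induct with
  | case1 => simp [collapse, normE, stripT]
  | case2 c r hc ih =>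
    rw [collapse, if_pos hc, ih]
    obtain ⟨hc1, hc2⟩ := hc
    subst hc1
    cases r with
    | nil => exact absurd hc2 (by decide)
    | cons d r' =>
      simp only [List.headD_cons] at hc2
      subst hc2
      simp [normE, normD]
  | case3 c r hc ih =>
    rw [collapse, if_neg hc]
    by_cases hcd : c = '.'
    · subst hcd
      have hr : r.headD ' ' ≠ '.' := by intro h; exact hc ⟨rfl, h⟩
      cases hre : r with
      | nil =>
        subst hre
        simp [collapse, stripT, normE, normD]
      | cons d r' =>
        have hd : d ≠ '.' := by subst hre; simpa using hr
        subst hre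
        have hcn : collapse (d :: r') ≠ [] := collapse_ne_nil _ (by simp)
        rw [stripT_cons _ _ hcn, ih]
        have hnd : normD (d :: r') = d :: normE r' := by simp [normD, hd]
        simp [normE, hnd, hd]
    · cases hre : r with
      | nil =>
        subst hre
        simp [collapse, stripT, normE, hcd]
      | cons d r' =>
        subst hre
        have hcn : collapse (d :: r') ≠ [] := collapse_ne_nil _ (by simp)
        rw [stripT_cons _ _ hcn, ih]
        simp [normE, hcd]

theorem strip_collapse (cs : List Char) : stripT (stripL (collapse cs)) = normD cs := by
  induction cs using collapse.induct with
  | case1 => simp [collapse, normD, stripL, stripT]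
  | case2 c r hc ih =>
    rw [collapse, if_pos hc, ih]
    obtain ⟨hc1, hc2⟩ := hc
    subst hc1
    cases r with
    | nil => exact absurd hc2 (by decide)
    | cons d r' =>
      simp only [List.headD_cons] at hc2
      subst hc2
      simp [normD]
  | case3 c r hc ih =>
    rw [collapse, if_neg hc]
    by_cases hcd : c = '.'
    · subst hcd
      have hr : r.headD ' ' ≠ '.' := by intro h; exact hc ⟨rfl, h⟩
      have hsl : stripL ('.' :: collapse r) = collapse r := by
        unfold stripL
        rw [if_pos ⟨by simp, by simp⟩]
        simp
      rw [hsl]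
      cases hre : r with
      | nil =>
        subst hre
        simp [collapse, stripT, normD]
      | cons d r' =>
        have hd : d ≠ '.' := by subst hre; simpa using hr
        subst hre
        have hslr : stripL (collapse (d :: r')) = collapse (d :: r') := by
          unfold stripL
          rw [if_neg]
          rintro ⟨-, hh⟩
          rw [headD_collapse d r' hd] at hh
          exact hd hh
        rw [← hslr, ih]
        simp [normD]
    · have hsl : stripL (c :: collapse r) = c :: collapse r := by
        unfold stripL
        rw [if_neg]
        rintro ⟨-, hh⟩
        simp at hh
        exact hcd hh
      rw [hsl]
      cases hre : r with
      | nil =>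
        subst hre
        simp [collapse, stripT, normD, normE, hcd]
      | cons d r' =>
        subst hre
        have hcn : collapse (d :: r') ≠ [] := collapse_ne_nil _ (by simp)
        rw [stripT_cons _ _ hcn, stripT_collapse]
        simp [normD, hcd]

-- B's segment pass: split on '.', drop empty parts, rejoin
def segJoin (cs : List Char) : List Char :=
  List.intercalate ['.'] ((cs.splitOn '.').filter (· ≠ []))

def segJoinE (cs : List Char) : List Char :=
  (cs.splitOn '.').headI ++
    (match ((cs.splitOn '.').tail).filter (· ≠ []) with
     | [] => [] | l => '.' :: List.intercalate ['.'] l)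

theorem intercalate_cons_ne (s a : List Char) (l : List (List Char)) :
    List.intercalate s (a :: l) = a ++ (match l with | [] => ([] : List Char) | _ => s ++ List.intercalate s l) := by
  cases l with
  | nil => simp [List.intercalate]
  | cons b l' => simp [List.intercalate, List.intersperse]

theorem intercalate_filter_ne_nil (l : List (List Char)) (h : (l.filter (· ≠ [])) ≠ []) :
    List.intercalate ['.'] (l.filter (· ≠ [])) ≠ [] := by
  cases hf : l.filter (· ≠ []) with
  | nil => exact absurd hf h
  | cons a l' =>
    have ha : a ≠ [] := by
      have := List.mem_filter.1 (hf ▸ List.mem_cons_self (l := l'))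
      simpa using this.2
    rw [intercalate_cons_ne]
    simp [ha]

theorem norm_eq_seg (cs : List Char) : normD cs = segJoin cs ∧ normE cs = segJoinE cs := by
  induction cs with
  | nil =>
    constructor <;> simp [normD, normE, segJoin, segJoinE, List.splitOn, List.splitOnP_nil, List.intercalate]
  | cons c r ih =>
    obtain ⟨ihD, ihE⟩ := ih
    by_cases hc : c = '.'
    · subst hc
      have hs : ('.' :: r).splitOn '.' = [] :: r.splitOn '.' := by
        simp [List.splitOn, List.splitOnP_cons]
      have hfilter : (('.' :: r).splitOn '.').filter (· ≠ []) = (r.splitOn '.').filter (· ≠ []) := by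
        rw [hs]; simp
      constructor
      · simp only [normD, segJoin, hfilter]
        exact ihD
      · simp only [normE, segJoinE, hs, List.tail_cons, List.headI, List.nil_append]
        rw [ihD, segJoin]
        cases hf : (r.splitOn '.').filter (· ≠ []) with
        | nil => simp [List.intercalate]
        | cons a l' =>
          have hne : List.intercalate ['.'] (a :: l') ≠ [] := by
            rw [← hf]; exact intercalate_filter_ne_nil _ (by rw [hf]; simp)
          cases hi : List.intercalate ['.'] (a :: l') with
          | nil => exact absurd hi hne
          | cons x y => simp [hi]
    · obtain ⟨p, ps, hps⟩ : ∃ p ps, r.splitOn '.' = p :: ps := by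
        cases h : r.splitOn '.' with
        | nil => exact absurd h (List.splitOnP_ne_nil _ r)
        | cons p ps => exact ⟨p, ps, rfl⟩
      have hs : (c :: r).splitOn '.' = (c :: p) :: ps := by
        simp only [List.splitOn, List.splitOnP_cons]
        rw [if_neg (by simpa using hc)]
        have : r.splitOnP (· == '.') = p :: ps := hps
        rw [this]
        simp
      have hTr : normE r = p ++ (match ps.filter (· ≠ []) with
          | [] => ([] : List Char) | l => '.' :: List.intercalate ['.'] l) := by
        rw [ihE, segJoinE, hps]
        rfl
      constructor
      · simp only [normD, if_neg hc, segJoin, hs]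
        have : ((c :: p) :: ps).filter (· ≠ []) = (c :: p) :: ps.filter (· ≠ []) := by simp
        rw [this, intercalate_cons_ne, hTr]
        cases hf : ps.filter (· ≠ []) with
        | nil => simp
        | cons a l' =>
          rw [intercalate_cons_ne]
          cases l' <;> simp [List.intercalate, List.intersperse]
      · simp only [normE, if_neg hc, segJoinE, hs, List.headI, List.tail_cons]
        rw [hTr]
        simp

-- step 6: endswith vs getLastD on a nonempty list
theorem endswith_dot (t : List Char) (ht : t ≠ []) :
    PySem.Chars.endswith t ['.'] = true ↔ t.getLastD ' ' = '.' := by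
  rw [PySem.Chars.endswith_iff]
  constructor
  · rintro ⟨u, hu⟩
    have : t.getLastD ' ' = (u ++ ['.']).getLastD ' ' := by rw [hu]
    simpa using this
  · intro h
    have hg : t.getLast ht = '.' := by
      rwa [List.getLastD_eq_getLast?, List.getLast?_eq_some_getLast (h := ht), Option.getD_some] at h
    exact ⟨t.dropLast, by rw [← hg]; exact List.dropLast_concat_getLast ht⟩

-- step 7: A's while loop is a replicate append
theorem pad_eq (t : List Char) :
    solutionPad t = t ++ List.replicate (3 - t.length) (t.getLastD ' ') := by
  induction t using solutionPad.induct with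
  | case1 t hlt ih =>
    rw [solutionPad, if_pos hlt, ih]
    have hg : (t ++ [t.getLastD ' ']).getLastD ' ' = t.getLastD ' ' := by
      simp [List.getLastD_eq_getLast?]
    rw [hg, List.append_assoc]
    congr 1
    have h3 : 3 - t.length = (3 - (t ++ [t.getLastD ' ']).length) + 1 := by
      simp only [List.length_append, List.length_cons, List.length_nil]
      omega
    rw [h3, List.replicate_succ]
    simp
  | case2 t hlt =>
    rw [solutionPad, if_neg hlt]
    have : 3 - t.length = 0 := by omega
    simp [this]

-- ===== VERDICT (by name: the statement is the Claim_ definition above) =====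
set_option maxHeartbeats 2000000 in
theorem solution_spec : Claim_equal_solution := by
  intro new_id _
  unfold Spec_solution solution solution_alt
  dsimp only
  rw [foldl_filter_id, List.nil_append, step3_eq, List.take_zero, List.drop_zero, List.nil_append]
  set f := (PySem.Chars.lower new_id.toList).filter idChar with hf
  have hseg : stripT (stripL (collapse f)) = segJoin f := (strip_collapse f).trans (norm_eq_seg f).1
  show String.mk _ = String.mk _
  congr 1
  -- the step 3–4 value on each side
  have e34 : (fun t => if t ≠ [] ∧ t.getLastD ' ' = '.' then t.dropLast else t)
      ((fun t => if t ≠ [] ∧ t.headD ' ' = '.' then t.tail else t) (collapse f))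
      = List.intercalate ['.'] ((f.splitOn '.').filter (· ≠ [])) := hseg
  simp only at e34
  rw [e34]
  set m := List.intercalate ['.'] ((f.splitOn '.').filter (· ≠ [])) with hm
  set m5 := if m = [] then ['a'] else m with hm5
  have hm5ne : m5 ≠ [] := by
    rw [hm5]; split
    · simp
    · assumption
  -- step 6: 16 ≤ len ↔ 15 < len and endswith vs getLastD
  have h6 : (if 16 ≤ m5.length then
        (fun t => if t.getLastD ' ' = '.' then t.dropLast else t) (m5.take 15) else m5)
      = (if 15 < m5.length then
        (fun t => if PySem.Chars.endswith t ['.'] then t.dropLast else t) (m5.take 15) else m5) := by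
    by_cases hl : 16 ≤ m5.length
    · rw [if_pos hl, if_pos (by omega)]
      have ht : m5.take 15 ≠ [] := by
        simp [List.take_eq_nil_iff]
        omega
      simp only
      by_cases hd : (m5.take 15).getLastD ' ' = '.'
      · rw [if_pos hd, if_pos ((endswith_dot _ ht).2 hd)]
      · rw [if_neg hd]
        rw [if_neg (fun hew => hd ((endswith_dot _ ht).1 hew))]
    · rw [if_neg hl, if_neg (by omega)]
  rw [h6]
  set m6 := (if 15 < m5.length then
        (fun t => if PySem.Chars.endswith t ['.'] then t.dropLast else t) (m5.take 15) else m5) with hm6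
  -- step 7
  by_cases h7 : m6.length ≤ 2
  · rw [if_pos h7, if_pos (by omega), pad_eq]
  · rw [if_neg h7, if_neg (by omega)]
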